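-- pv_equiv track=rewrite | github.com/AiranCana/modulosPython | modulo_4/ex1/ft_archive_creation.py | opten_good_text
-- ===== SOURCE A (Python) =====
-- def opten_good_text(s: str) -> str:
--     nex = True
--     r = ""
--     for i in s:
--         if i == "\n" and nex:
--             r += "#"
--             nex = False
--         elif not i == "\n" and not nex:
--             nex = True
--         r += i
--     return r
-- ===== SOURCE B (Python) =====
-- import re
--
-- def opten_good_text(s: str) -> str:
--     # Insert '#' before each newline that is not preceded by another newline
--     # (this includes a newline at position 0).
--     return re.sub(r'(?<!\n)\n', '#\n', s)
-- ===== Notes on version B (the rewrite author's own statement) =====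
-- stated objective: idiomatic
-- what changed: Replaced the stateful character-by-character loop with its flag by a single regex substitution whose negative lookbehind inserts the marker before each newline not preceded by another newline (exactly A's rule), moving the per-character work into the C regex engine.
import Mathlib
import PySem

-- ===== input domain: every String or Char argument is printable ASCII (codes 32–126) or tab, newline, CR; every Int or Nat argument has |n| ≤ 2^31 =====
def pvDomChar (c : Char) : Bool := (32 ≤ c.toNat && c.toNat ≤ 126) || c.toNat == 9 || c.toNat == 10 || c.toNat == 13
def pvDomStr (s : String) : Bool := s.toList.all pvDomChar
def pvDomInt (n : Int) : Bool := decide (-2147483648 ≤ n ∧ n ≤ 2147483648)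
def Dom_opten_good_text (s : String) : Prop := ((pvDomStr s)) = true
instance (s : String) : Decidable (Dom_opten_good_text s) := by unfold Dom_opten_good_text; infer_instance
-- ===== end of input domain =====

-- B replaces A's stateful character loop by a single regex substitution
-- (re.sub(r'(?<!\n)\n', '#\n', s)): same return value, idiomatic one-liner.

-- ===== PORT A =====
-- stateful loop: flag `nex`, accumulator `r`, `r += i` every iteration
-- loop body of A: flag `nex`, accumulator `r`; branches in A's order, `r += i` always
def pvStepA (acc : Bool × List Char) (i : Char) : Bool × List Char :=
  let nex := acc.1
  let r := acc.2
  if i = '\n' ∧ nex then (false, r ++ ['#'] ++ [i])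
  else if ¬ i = '\n' ∧ ¬ nex then (true, r ++ [i])
  else (nex, r ++ [i])

def opten_good_text (s : String) : String :=
  let st := s.toList.foldl pvStepA (true, [])
  String.mk st.2

-- ===== PORT B =====
-- hand port of re.sub(r'(?<!\n)\n', '#\n', s): pair each character with its
-- predecessor (none at position 0) and replace a '\n' whose predecessor is not
-- '\n' by "#\n"; exact for this pattern (negative lookbehind = predecessor test).
def opten_good_text_alt (s : String) : String :=
  let cs := s.toList
  String.mk (((none :: cs.map some).zip cs).flatMap
    (fun pc => if pc.2 = '\n' ∧ pc.1 ≠ some '\n' then ['#', '\n'] else [pc.2]))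

-- ===== PRECONDITION & SPEC =====
def Spec_opten_good_text (s : String) (out : String) : Prop := out = opten_good_text_alt s
instance (s : String) (out : String) : Decidable (Spec_opten_good_text s out) := by unfold Spec_opten_good_text; infer_instance

-- ===== CLAIM (what is proved, stated in full; the proofs are below) =====
def Claim_equal_opten_good_text : Prop := ∀ (s : String), Dom_opten_good_text s → Spec_opten_good_text s (opten_good_text s)

-- ===== LEMMAS AND PROOFS =====

-- reference recursion: output for suffix cs given the predecessor of its head
def pvG (prev : Option Char) : List Char → List Char
  | [] => []
  | c :: cs => (if c = '\n' ∧ prev ≠ some '\n' then ['#', '\n'] else [c]) ++ pvG (some c) cs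

theorem pvG_eq_zip (cs : List Char) : ∀ (prev : Option Char),
    ((prev :: cs.map some).zip cs).flatMap
      (fun pc => if pc.2 = '\n' ∧ pc.1 ≠ some '\n' then ['#', '\n'] else [pc.2])
      = pvG prev cs := by
  induction cs with
  | nil => intro prev; rfl
  | cons c cs ih =>
      intro prev
      simp only [List.map, List.zip_cons_cons, List.flatMap_cons, pvG, ih (some c)]

def pvNex (prev : Option Char) : Bool := !(prev == some '\n')

theorem pvLast_or (c : Char) (cs : List Char) (prev : Option Char) :
    ((c :: cs).getLast?.or prev) = cs.getLast?.or (some c) := by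
  cases cs with
  | nil => rfl
  | cons d ds =>
      rw [List.getLast?_cons_cons]
      cases h : (d :: ds).getLast? with
      | none => simp [List.getLast?_eq_none_iff] at h
      | some x => simp

theorem pvStepA_eq (prev : Option Char) (r : List Char) (c : Char) :
    pvStepA (pvNex prev, r) c
      = (pvNex (some c), r ++ (if c = '\n' ∧ prev ≠ some '\n' then ['#', '\n'] else [c])) := by
  by_cases hc : c = '\n' <;> by_cases hp : prev = some '\n' <;> simp [pvStepA, pvNex, hc, hp]

theorem pvA_loop (cs : List Char) : ∀ (prev : Option Char) (r : List Char),
    cs.foldl pvStepA (pvNex prev, r)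
      = (pvNex (cs.getLast?.or prev), r ++ pvG prev cs) := by
  induction cs with
  | nil => intro prev r; simp [pvG]
  | cons c cs ih =>
      intro prev r
      rw [List.foldl_cons, pvStepA_eq, ih (some c), pvLast_or, pvG, List.append_assoc]

-- ===== VERDICT (by name: the statement is the Claim_ definition above) =====
theorem opten_good_text_spec : Claim_equal_opten_good_text := by
  intro s _
  show opten_good_text s = opten_good_text_alt s
  have h := pvA_loop s.toList none []
  simp only [opten_good_text, opten_good_text_alt,
    show (true : Bool) = pvNex none from rfl, h, List.nil_append, pvG_eq_zip]
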